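-- pv_equiv track=rewrite | github.com/wulongteakk/graph_jointlk | backend/causal_jointlk/gbt4754_lookup.py | _extract_code_candidates
-- ===== SOURCE A (Python) =====
-- from typing import Dict, Iterable, List, Optional, Sequence
--
-- def _extract_code_candidates(text: str) -> Sequence[str]:
--     tokens = []
--     current = []
--     for ch in text:
--         if ch.isalnum():
--             current.append(ch)
--         else:
--             if current:
--                 tokens.append("".join(current))
--             current = []
--     if current:
--         tokens.append("".join(current))
--     return [tok for tok in tokens if any(c.isdigit() for c in tok) and 2 <= len(tok) <= 5]
-- ===== SOURCE B (Python) =====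
-- def _extract_code_candidates(text):
--     # Boundary-index tokenizer: mark alnum positions, find run starts/ends by
--     # neighbour comparison, slice the runs out, then filter by length/digit.
--     alnum = [c.isalnum() for c in text]
--     n = len(text)
--     starts = [i for i in range(n) if alnum[i] and (i == 0 or not alnum[i - 1])]
--     ends = [i + 1 for i in range(n) if alnum[i] and (i + 1 == n or not alnum[i + 1])]
--     out = []
--     for s, e in zip(starts, ends):
--         if 2 <= e - s <= 5:
--             tok = text[s:e]
--             if any(c.isdigit() for c in tok):
--                 out.append(tok)
--     return out
-- ===== Notes on version B (the rewrite author's own statement) =====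
-- stated objective: alternative
-- what changed: Replaced A's single-pass buffer tokenizer (accumulate chars, flush on non-alnum) by a boundary-index method: build a boolean alnum mask, compute run start and end indices by comparing each position with its neighbour, zip them and slice the tokens out of the string, filtering by length and digit content as the pairs are scanned.
import Mathlib
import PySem

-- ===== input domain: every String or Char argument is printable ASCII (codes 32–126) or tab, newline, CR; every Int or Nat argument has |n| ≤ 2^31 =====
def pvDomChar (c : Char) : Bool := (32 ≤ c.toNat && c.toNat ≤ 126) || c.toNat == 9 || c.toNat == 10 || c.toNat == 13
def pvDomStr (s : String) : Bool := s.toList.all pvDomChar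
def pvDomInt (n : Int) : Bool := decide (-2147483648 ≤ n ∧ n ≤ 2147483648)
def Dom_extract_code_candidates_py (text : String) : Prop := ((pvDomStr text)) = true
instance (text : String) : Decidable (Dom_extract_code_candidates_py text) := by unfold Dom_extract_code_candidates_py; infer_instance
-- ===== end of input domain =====

-- B replaces A's single-pass buffer tokenizer by a boundary-index method: a boolean
-- alnum mask, run starts/ends found by neighbour comparison, tokens cut out as slices
-- (alternative decomposition, same cost). Return values proved equal on all inputs.

-- ===== PORT A =====
-- manual tokenizer: fold over chars with state (tokens, current buffer), flush at end
def extract_code_candidates_py (text : String) : List String :=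
  let st := text.toList.foldl
    (fun (st : List String × List Char) ch =>
      if PySem.Chars.isalnum ch then (st.1, st.2 ++ [ch])
      else if st.2 ≠ [] then (st.1 ++ [String.ofList st.2], []) else (st.1, []))
    ([], [])
  let tokens := if st.2 ≠ [] then st.1 ++ [String.ofList st.2] else st.1
  tokens.filter (fun tok =>
    tok.toList.any PySem.Chars.isdigit &&
    decide (2 ≤ PySem.Str.len tok ∧ PySem.Str.len tok ≤ 5))

-- ===== PORT B =====
-- boundary-index tokenizer: alnum mask, start/end indices by neighbour comparison,
-- slices text[s:e]; 0 ≤ s ≤ e so the slice is exactly drop/take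
def extract_code_candidates_py_alt (text : String) : List String :=
  let cs := text.toList
  let alnum := cs.map PySem.Chars.isalnum
  let n := cs.length
  let starts := (List.range n).filter
    (fun i => alnum.getD i false && (decide (i = 0) || !(alnum.getD (i - 1) false)))
  let ends := ((List.range n).filter
    (fun i => alnum.getD i false && (decide (i + 1 = n) || !(alnum.getD (i + 1) false)))).map (· + 1)
  (starts.zip ends).foldl
    (fun out p =>
      if 2 ≤ p.2 - p.1 ∧ p.2 - p.1 ≤ 5 then
        let tok := String.ofList ((cs.drop p.1).take (p.2 - p.1))
        if tok.toList.any PySem.Chars.isdigit then out ++ [tok] else out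
      else out) []

-- ===== PRECONDITION & SPEC =====
def Spec_extract_code_candidates_py (text : String) (out : List String) : Prop := out = extract_code_candidates_py_alt text
instance (text : String) (out : List String) : Decidable (Spec_extract_code_candidates_py text out) := by unfold Spec_extract_code_candidates_py; infer_instance

-- ===== CLAIM (what is proved, stated in full; the proofs are below) =====
def Claim_equal_extract_code_candidates_py : Prop := ∀ (text : String), Dom_extract_code_candidates_py text → Spec_extract_code_candidates_py text (extract_code_candidates_py text)

-- ===== LEMMAS AND PROOFS =====

-- A's loop as a token-emitting recursion over char lists (proof-only helper)
def pvGL : List Char → List Char → List (List Char)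
  | cur, [] => if cur ≠ [] then [cur] else []
  | cur, c :: s =>
    if PySem.Chars.isalnum c then pvGL (cur ++ [c]) s
    else (if cur ≠ [] then [cur] else []) ++ pvGL [] s

-- run-start indices of a boolean mask, tracking the previous value
def pvS (prev : Bool) : List Bool → List Nat
  | [] => []
  | b :: t => (if b && !prev then [0] else []) ++ (pvS b t).map (· + 1)

-- inclusive run-end indices of a boolean mask
def pvE : List Bool → List Nat
  | [] => []
  | b :: t => (if b && !(t.getD 0 false) then [0] else []) ++ (pvE t).map (· + 1)

def pvAl (cs : List Char) : List Bool := cs.map PySem.Chars.isalnum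
def pvZip (cs : List Char) : List (Nat × Nat) :=
  (pvS false (pvAl cs)).zip ((pvE (pvAl cs)).map (· + 1))
def pvSlice (cs : List Char) (p : Nat × Nat) : List Char := (cs.drop p.1).take (p.2 - p.1)

-- A's fold, flushed, emits exactly pvGL's tokens
theorem pvFold_eq_GL (s : List Char) : ∀ (toks : List String) (cur : List Char),
    (let st := s.foldl
      (fun (st : List String × List Char) ch =>
        if PySem.Chars.isalnum ch then (st.1, st.2 ++ [ch])
        else if st.2 ≠ [] then (st.1 ++ [String.ofList st.2], []) else (st.1, []))
      (toks, cur)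
     if st.2 ≠ [] then st.1 ++ [String.ofList st.2] else st.1)
    = toks ++ (pvGL cur s).map String.ofList := by
  induction s with
  | nil =>
    intro toks cur
    by_cases h : cur = [] <;> simp [pvGL, h]
  | cons c t ih =>
    intro toks cur
    by_cases ha : PySem.Chars.isalnum c = true
    · simpa [List.foldl_cons, ha, pvGL] using ih toks (cur ++ [c])
    · have ha' : PySem.Chars.isalnum c = false := by simpa using ha
      by_cases h : cur = []
      · simpa [List.foldl_cons, ha', pvGL, h] using ih toks []
      · simpa [List.foldl_cons, ha', pvGL, h] using ih (toks ++ [String.ofList cur]) []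

-- the range/filter form of the start indices equals pvS
theorem pvS_eq (al : List Bool) : ∀ prev,
    (List.range al.length).filter
      (fun i => al.getD i false && (if i = 0 then !prev else !(al.getD (i - 1) false)))
    = pvS prev al := by
  induction al with
  | nil => intro prev; simp [pvS]
  | cons b t ih =>
    intro prev
    rw [List.length_cons, List.range_succ_eq_map, List.filter_cons, List.filter_map]
    have hcomp :
        ((fun i => (b :: t).getD i false && (if i = 0 then !prev else !((b :: t).getD (i - 1) false))) ∘ Nat.succ)
        = (fun i => t.getD i false && (if i = 0 then !b else !(t.getD (i - 1) false))) := by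
      funext i; cases i <;> simp
    rw [hcomp, ih b]
    by_cases hb : (b && !prev) = true <;>
      simp [pvS, hb, Nat.succ_eq_add_one]

-- the port's start predicate (with the i = 0 short-circuit) equals the tracked form
theorem pvS_port (al : List Bool) :
    (List.range al.length).filter
      (fun i => al.getD i false && (decide (i = 0) || !(al.getD (i - 1) false)))
    = pvS false al := by
  rw [← pvS_eq al false]
  apply List.filter_congr
  intro i _; cases i <;> simp

-- the range/filter form of the end indices equals pvE
theorem pvE_eq (al : List Bool) :
    (List.range al.length).filter (fun i => al.getD i false && !(al.getD (i + 1) false))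
    = pvE al := by
  induction al with
  | nil => simp [pvE]
  | cons b t ih =>
    rw [List.length_cons, List.range_succ_eq_map, List.filter_cons, List.filter_map]
    have hcomp :
        ((fun i => (b :: t).getD i false && !((b :: t).getD (i + 1) false)) ∘ Nat.succ)
        = (fun i => t.getD i false && !(t.getD (i + 1) false)) := by
      funext i; simp
    rw [hcomp, ih]
    simp only [pvE]
    cases hb : t[0]?.getD false <;> cases b <;> simp [hb]

-- the port's end predicate (with the i+1 = n short-circuit) equals the plain form
theorem pvE_port (al : List Bool) :
    (List.range al.length).filter
      (fun i => al.getD i false && (decide (i + 1 = al.length) || !(al.getD (i + 1) false)))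
    = pvE al := by
  rw [← pvE_eq al]
  apply List.filter_congr
  intro i hi
  by_cases h : i + 1 = al.length
  · have hd : al.getD (i + 1) false = false := List.getD_eq_default _ _ (by omega)
    simp [h, hd]
  · simp [h]

-- the previous value is irrelevant when the mask starts with false (or is empty)
theorem pvS_false_head (v : List Bool) (hv : v.getD 0 false = false) (prev : Bool) :
    pvS prev v = pvS false v := by
  cases v with
  | nil => rfl
  | cons b t =>
    have hb : b = false := by simpa using hv
    subst hb; simp [pvS]

theorem pvS_true_run (m : Nat) (v : List Bool) (hv : v.getD 0 false = false) :
    pvS true (List.replicate m true ++ v) = (pvS false v).map (· + m) := by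
  induction m with
  | zero => simp [pvS_false_head v hv true]
  | succ m ih =>
    have hfun : ((· + 1) ∘ (· + m) : Nat → Nat) = (· + (m + 1)) := by
      funext x; show x + m + 1 = x + (m + 1); omega
    simp only [List.replicate_succ, List.cons_append, pvS, ih, List.map_map, hfun]
    simp

theorem pvS_run (m : Nat) (v : List Bool) (hv : v.getD 0 false = false) :
    pvS false (List.replicate (m + 1) true ++ v) = 0 :: (pvS false v).map (· + (m + 1)) := by
  have hfun : ((· + 1) ∘ (· + m) : Nat → Nat) = (· + (m + 1)) := by
    funext x; show x + m + 1 = x + (m + 1); omega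
  simp only [List.replicate_succ, List.cons_append, pvS, pvS_true_run m v hv,
    List.map_map, hfun]
  simp

theorem pvE_run (m : Nat) (v : List Bool) (hv : v.getD 0 false = false) :
    pvE (List.replicate (m + 1) true ++ v) = m :: (pvE v).map (· + (m + 1)) := by
  have hv' : v[0]?.getD false = false := by simpa [List.getD] using hv
  induction m with
  | zero => simp [List.replicate_succ, pvE, hv']
  | succ m ih =>
    have hhead : (List.replicate (m + 1) true ++ v)[0]?.getD false = true := by
      simp [List.replicate_succ]
    have hfun : ((· + 1) ∘ (· + (m + 1)) : Nat → Nat) = (· + (m + 2)) := by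
      funext x; show x + (m + 1) + 1 = x + (m + 2); omega
    simp only [List.replicate_succ (n := m + 1), List.cons_append, pvE, hhead, ih,
      List.map_map, hfun]
    simp

-- pvGL absorbs a leading all-alnum prefix into the buffer
theorem pvGL_run (r : List Char) (hr : ∀ x ∈ r, PySem.Chars.isalnum x = true) :
    ∀ cur u, pvGL cur (r ++ u) = pvGL (cur ++ r) u := by
  induction r with
  | nil => intro cur u; simp
  | cons a r ih =>
    intro cur u
    have ha : PySem.Chars.isalnum a = true := hr a (by simp)
    have hr' : ∀ x ∈ r, PySem.Chars.isalnum x = true := fun x hx => hr x (by simp [hx])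
    simp [pvGL, ha, ih hr' (cur ++ [a]) u, List.append_assoc]

-- pvGL flushes a nonempty buffer when the rest does not start with an alnum char
theorem pvGL_flush (cur : List Char) (hc : cur ≠ []) (u : List Char)
    (hu : (pvAl u).getD 0 false = false) : pvGL cur u = cur :: pvGL [] u := by
  cases u with
  | nil => simp [pvGL, hc]
  | cons d u' =>
    have hd : PySem.Chars.isalnum d = false := by simpa [pvAl] using hu
    simp [pvGL, hc, hd]

theorem pvAl_replicate (r : List Char) (hr : ∀ x ∈ r, PySem.Chars.isalnum x = true) :
    pvAl r = List.replicate r.length true := by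
  induction r with
  | nil => rfl
  | cons a r ih =>
    have hr' : ∀ x ∈ r, PySem.Chars.isalnum x = true := fun x hx => hr x (by simp [hx])
    simp [pvAl, List.replicate_succ, hr a (by simp)]
    simpa [pvAl] using ih hr'

-- MAIN: the zipped boundary indices, sliced, are exactly A's tokens, and each pair is in range
theorem pvMain : ∀ (cs : List Char),
    (pvZip cs).map (pvSlice cs) = pvGL [] cs ∧
    (∀ p ∈ pvZip cs, p.1 ≤ p.2 ∧ p.2 ≤ cs.length)
  | [] => by simp [pvZip, pvAl, pvS, pvE, pvGL]
  | c :: t => by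
    by_cases hc : PySem.Chars.isalnum c = true
    · -- alnum head: peel off the whole alnum run r, recurse on the remainder u
      set r : List Char := c :: t.takeWhile PySem.Chars.isalnum with hr_def
      set u : List Char := t.dropWhile PySem.Chars.isalnum with hu_def
      have hlen : u.length < (c :: t).length := by
        rw [hu_def]
        have := t.length_dropWhile_le PySem.Chars.isalnum
        simp only [List.length_cons]; omega
      have IH := pvMain u
      have hcs : c :: t = r ++ u := by
        simp [hr_def, hu_def, List.takeWhile_append_dropWhile]
      have hrall : ∀ x ∈ r, PySem.Chars.isalnum x = true := by
        intro x hx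
        rcases List.mem_cons.1 hx with h | h
        · subst h; exact hc
        · exact List.mem_takeWhile_imp h
      have hu0 : (pvAl u).getD 0 false = false := by
        cases hu : u with
        | nil => simp [pvAl]
        | cons d u' =>
          have : PySem.Chars.isalnum d = false := by
            have := List.head_dropWhile_not PySem.Chars.isalnum (l := t)
              (by simp [← hu_def, hu])
            simpa [← hu_def, hu] using this
          simp [pvAl, this]
      have hm : r.length = (t.takeWhile PySem.Chars.isalnum).length + 1 := by
        simp [hr_def]
      set m : Nat := (t.takeWhile PySem.Chars.isalnum).length with hm_def
      have hal : pvAl (c :: t) = List.replicate (m + 1) true ++ pvAl u := by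
        rw [hcs]
        simp only [pvAl, List.map_append]
        rw [show (r.map PySem.Chars.isalnum) = pvAl r from rfl, pvAl_replicate r hrall, hm]
      have hzip : pvZip (c :: t)
          = (0, m + 1) :: (pvZip u).map (Prod.map (· + (m + 1)) (· + (m + 1))) := by
        unfold pvZip
        rw [hal, pvS_run m _ hu0, pvE_run m _ hu0]
        have hfun : ((· + 1) ∘ (· + (m + 1)) : Nat → Nat) = ((· + (m + 1)) ∘ (· + 1)) := by
          funext x; show x + (m + 1) + 1 = x + 1 + (m + 1); omega
        simp only [List.map_cons, List.map_map, hfun]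
        rw [← List.map_map (f := (· + 1)) (g := (· + (m + 1)))]
        rw [List.zip_cons_cons, ← List.zip_map]
      constructor
      · rw [hzip, List.map_cons]
        have hhead : pvSlice (c :: t) (0, m + 1) = r := by
          simp only [pvSlice, hcs, Nat.sub_zero, List.drop_zero]
          rw [← hm]
          exact List.take_left
        have htail : ((pvZip u).map (Prod.map (· + (m + 1)) (· + (m + 1)))).map (pvSlice (c :: t))
            = (pvZip u).map (pvSlice u) := by
          rw [List.map_map]
          apply List.map_congr_left
          intro p _
          simp only [Function.comp, Prod.map, pvSlice, hcs]
          have h1 : p.1 + (m + 1) = r.length + p.1 := by omega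
          have h2 : p.2 + (m + 1) - (r.length + p.1) = p.2 - p.1 := by omega
          have h3 : r.drop (r.length + p.1) = [] := List.drop_eq_nil_of_le (by omega)
          have h4 : r.length + p.1 - r.length = p.1 := by omega
          rw [h1, h2, List.drop_append, h3, h4, List.nil_append]
        rw [hhead, htail, IH.1, hcs, pvGL_run r hrall [] u]
        simp only [List.nil_append]
        rw [pvGL_flush r (by simp [hr_def]) u hu0]
      · intro p hp
        rw [hzip] at hp
        rcases List.mem_cons.1 hp with h | h
        · subst h
          have : (m + 1) ≤ (c :: t).length := by
            have : (c :: t).length = r.length + u.length := by rw [hcs]; simp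
            omega
          simpa using this
        · rcases List.mem_map.1 h with ⟨q, hq, hqe⟩
          have hb := IH.2 q hq
          have : (c :: t).length = r.length + u.length := by rw [hcs]; simp
          subst hqe
          simp only [Prod.map]
          constructor <;> omega
    · -- non-alnum head: everything shifts by one
      have hc' : PySem.Chars.isalnum c = false := by simpa using hc
      have IH := pvMain t
      have hzip : pvZip (c :: t) = (pvZip t).map (Prod.map (· + 1) (· + 1)) := by
        unfold pvZip
        have hal : pvAl (c :: t) = false :: pvAl t := by simp [pvAl, hc']
        have h1 : pvS false (false :: pvAl t) = (pvS false (pvAl t)).map (· + 1) := by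
          simp [pvS]
        have h2 : pvE (false :: pvAl t) = (pvE (pvAl t)).map (· + 1) := by
          simp [pvE]
        rw [hal, h1, h2, List.zip_map]
      constructor
      · rw [hzip, List.map_map]
        have : (pvSlice (c :: t)) ∘ (Prod.map (· + 1) (· + 1)) = pvSlice t := by
          funext p
          simp only [Function.comp, Prod.map, pvSlice, List.drop_succ_cons]
          congr 1
          omega
        rw [this, IH.1]
        simp [pvGL, hc']
      · intro p hp
        rw [hzip] at hp
        rcases List.mem_map.1 hp with ⟨q, hq, hqe⟩
        have hb := IH.2 q hq
        subst hqe
        simp only [Prod.map, List.length_cons]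
        constructor <;> omega
termination_by cs => cs.length
decreasing_by
  · exact hlen
  · simp

-- filtering before mapping equals mapping then filtering a pointwise-corresponding predicate
theorem pvFilterMap {α β : Type} (l : List α) (q : α → Bool) (f : α → β) (q' : β → Bool)
    (h : ∀ x ∈ l, q x = q' (f x)) : (l.filter q).map f = (l.map f).filter q' := by
  induction l with
  | nil => rfl
  | cons a l ih =>
    have ha := h a (by simp)
    have ih' := ih (fun x hx => h x (by simp [hx]))
    by_cases hq : q a = true
    · simp [List.filter_cons, hq, ← ha, ih']
    · have hq' : q a = false := by simpa using hq
      simp [List.filter_cons, hq', ← ha, ih']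

-- ===== VERDICT (by name: the statement is the Claim_ definition above) =====
theorem extract_code_candidates_py_spec : Claim_equal_extract_code_candidates_py := by
  intro text _
  simp only [Spec_extract_code_candidates_py, extract_code_candidates_py,
    extract_code_candidates_py_alt]
  set cs := text.toList with hcs
  -- A side: the fold's flushed tokens are pvGL's tokens
  have hA := pvFold_eq_GL cs [] []
  simp only [ne_eq, ite_not] at hA ⊢
  rw [hA]
  -- B side: the two range filters are pvS / pvE
  have hlenal : cs.length = (cs.map PySem.Chars.isalnum).length := by simp
  rw [hlenal, pvS_port, pvE_port]
  -- the fold with nested ifs is an append-if fold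
  have hstep : (fun (out : List String) (p : Nat × Nat) =>
      if 2 ≤ p.2 - p.1 ∧ p.2 - p.1 ≤ 5 then
        if (String.ofList ((cs.drop p.1).take (p.2 - p.1))).toList.any PySem.Chars.isdigit then
          out ++ [String.ofList ((cs.drop p.1).take (p.2 - p.1))]
        else out
      else out)
      = (fun (out : List String) (p : Nat × Nat) =>
        if (decide (2 ≤ p.2 - p.1 ∧ p.2 - p.1 ≤ 5)
            && ((cs.drop p.1).take (p.2 - p.1)).any PySem.Chars.isdigit) = true then
          out ++ [String.ofList ((cs.drop p.1).take (p.2 - p.1))]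
        else out) := by
    funext out p
    by_cases h1 : 2 ≤ p.2 - p.1 ∧ p.2 - p.1 ≤ 5 <;>
      by_cases h2 : ((cs.drop p.1).take (p.2 - p.1)).any PySem.Chars.isdigit = true <;>
        simp [h1, h2]
  rw [show (pvS false (cs.map PySem.Chars.isalnum)).zip
        ((pvE (cs.map PySem.Chars.isalnum)).map (· + 1)) = pvZip cs from rfl]
  rw [hstep, PySem.List.foldl_append_if]
  rw [pvFilterMap (pvZip cs) _ _
    (fun tok => tok.toList.any PySem.Chars.isdigit
      && decide (2 ≤ PySem.Str.len tok ∧ PySem.Str.len tok ≤ 5))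
    (by
      intro p hp
      have hb := (pvMain cs).2 p hp
      have hlen : ((cs.drop p.1).take (p.2 - p.1)).length = p.2 - p.1 := by
        simp only [List.length_take, List.length_drop]
        omega
      simp [PySem.Str.len_eq, hlen, Bool.and_comm])]
  rw [show (fun p => String.ofList ((cs.drop p.1).take (p.2 - p.1)))
        = (String.ofList ∘ pvSlice cs) from rfl]
  rw [← List.map_map, (pvMain cs).1]
  simp
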